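-- pv_equiv track=rewrite | github.com/cartkid/practice | src/shifts.py | compute_penalty
-- ===== SOURCE A (Python) =====
-- def _split_input_to_list(input: str) -> list:
--     return input.split(" ")
--
-- def compute_penalty(input: str, closing_time: int) -> int:
--     # input "Y Y N Y"
--     return_me: int = 0
--     hours = _split_input_to_list(input)
--
--     for idx, hour in enumerate(hours):
--         if hour == "Y" and closing_time <= idx:
--             # closed when it should have been open
--             return_me += 1
--         elif hour == "N" and closing_time > idx:
--             # open when it should have been closed
--             return_me += 1
--     return return_me
-- ===== SOURCE B (Python) =====
-- def compute_penalty(input: str, closing_time: int) -> int: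
--     hours = input.split(" ")
--     # baseline: penalty as if the shop were closed for every hour
--     penalty = hours.count("Y")
--     # correct the hours before closing: there "N" is the offence and "Y" is fine
--     c = min(max(closing_time, 0), len(hours))
--     for hour in hours[:c]:
--         if hour == "N":
--             penalty += 1
--         elif hour == "Y":
--             penalty -= 1
--     return penalty
-- ===== Notes on version B (the rewrite author's own statement) =====
-- stated objective: alternative
-- what changed: Replaces A's single per-element index-comparing loop by a baseline global count of 'Y' (penalty if closed everywhere) followed by a corrective pass over only the clamped prefix before closing time (+1 per 'N', -1 per 'Y').
import Mathlib
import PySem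

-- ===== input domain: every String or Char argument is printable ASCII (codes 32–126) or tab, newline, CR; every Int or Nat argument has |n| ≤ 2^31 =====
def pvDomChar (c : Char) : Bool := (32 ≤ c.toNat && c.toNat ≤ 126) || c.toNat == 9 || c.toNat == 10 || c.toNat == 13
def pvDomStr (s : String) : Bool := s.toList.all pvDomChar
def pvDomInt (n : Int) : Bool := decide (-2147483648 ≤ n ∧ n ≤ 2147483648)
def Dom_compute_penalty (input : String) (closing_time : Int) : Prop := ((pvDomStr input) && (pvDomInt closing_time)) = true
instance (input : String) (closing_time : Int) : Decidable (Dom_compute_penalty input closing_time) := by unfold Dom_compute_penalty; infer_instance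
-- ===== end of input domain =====

-- B starts from a global count of "Y" (the penalty if the shop were closed everywhere) and then
-- corrects it over only the clamped prefix before closing time (+1 per "N", -1 per "Y"),
-- instead of A's per-element index-comparing loop; objective: alternative decomposition.

-- ===== PORT A =====
def pv_split_input_to_list (input : String) : List String :=
  (PySem.Str.split? input " ").getD []

def compute_penalty (input : String) (closing_time : Int) : Int :=
  let hours := pv_split_input_to_list input
  (PySem.List.enumerate hours 0).foldl (fun return_me p =>
    if p.2 == "Y" && decide (closing_time ≤ p.1) then return_me + 1
    else if p.2 == "N" && decide (closing_time > p.1) then return_me + 1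
    else return_me) 0

-- ===== PORT B =====
def compute_penalty_alt (input : String) (closing_time : Int) : Int :=
  let hours := (PySem.Str.split? input " ").getD []
  let penalty : Int := (hours.count "Y" : Int)
  let c := min (max closing_time 0) (hours.length : Int)
  (PySem.List.slice hours none (some c)).foldl (fun penalty hour =>
    if hour == "N" then penalty + 1
    else if hour == "Y" then penalty - 1
    else penalty) penalty

-- ===== PRECONDITION & SPEC =====
def Spec_compute_penalty (input : String) (closing_time : Int) (out : Int) : Prop := out = compute_penalty_alt input closing_time
instance (input : String) (closing_time : Int) (out : Int) : Decidable (Spec_compute_penalty input closing_time out) := by unfold Spec_compute_penalty; infer_instance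

-- ===== CLAIM (what is proved, stated in full; the proofs are below) =====
def Claim_equal_compute_penalty : Prop := ∀ (input : String) (closing_time : Int), Dom_compute_penalty input closing_time → Spec_compute_penalty input closing_time (compute_penalty input closing_time)

-- ===== LEMMAS AND PROOFS =====

-- A's loop over enumerate equals the two partitioned counts, for any start index and accumulator.
theorem pv_loop_eq (ct : Int) (l : List String) (s : Nat) (acc : Int) :
    (PySem.List.enumerate l (s : Int)).foldl (fun return_me p =>
      if p.2 == "Y" && decide (ct ≤ p.1) then return_me + 1
      else if p.2 == "N" && decide (ct > p.1) then return_me + 1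
      else return_me) acc
    = acc + ((l.take ((max 0 ct).toNat - s)).count "N" : Int)
        + ((l.drop ((max 0 ct).toNat - s)).count "Y" : Int) := by
  induction l generalizing s acc with
  | nil => simp [PySem.List.enumerate_nil]
  | cons x xs ih =>
    rw [PySem.List.enumerate_cons]
    have hs1 : ((s : Int) + 1) = ((s + 1 : Nat) : Int) := by push_cast; ring
    by_cases hc : (max 0 ct).toNat ≤ s
    · have h1 : ct ≤ (s : Int) := by omega
      have h2 : ¬ ((s : Int) < ct) := by omega
      have ht : (max 0 ct).toNat - s = 0 := by omega
      have ht1 : (max 0 ct).toNat - (s + 1) = 0 := by omega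
      simp only [List.foldl_cons, hs1, ih, ht, ht1, List.take_zero, List.drop_zero]
      by_cases hx : x = "Y"
      · simp [hx, h1]; ring
      · simp [hx, h1, h2]
    · have h1 : ¬ (ct ≤ (s : Int)) := by omega
      have h2 : (s : Int) < ct := by omega
      have ht : (max 0 ct).toNat - s = ((max 0 ct).toNat - (s + 1)) + 1 := by omega
      simp only [List.foldl_cons, hs1, ih, ht, List.take_succ_cons, List.drop_succ_cons]
      by_cases hx : x = "N"
      · simp [hx, h1, h2]; ring
      · simp [hx, h1, h2]

-- B's corrective fold over a list adds count "N" and subtracts count "Y".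
theorem pv_fix_eq (l : List String) (acc : Int) :
    l.foldl (fun penalty hour =>
      if hour == "N" then penalty + 1
      else if hour == "Y" then penalty - 1
      else penalty) acc
    = acc + (l.count "N" : Int) - (l.count "Y" : Int) := by
  induction l generalizing acc with
  | nil => simp
  | cons x xs ih =>
    simp only [List.foldl_cons, ih]
    by_cases hN : x = "N"
    · simp [hN]; ring
    · by_cases hY : x = "Y"
      · simp [hY]; ring
      · simp [hN, hY]

-- ===== VERDICT (by name: the statement is the Claim_ definition above) =====
theorem compute_penalty_spec : Claim_equal_compute_penalty := by
  intro input closing_time _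
  unfold Spec_compute_penalty compute_penalty compute_penalty_alt pv_split_input_to_list
  dsimp only
  set l := (PySem.Str.split? input " ").getD [] with hl
  have hc0 : (0 : Int) ≤ min (max closing_time 0) (l.length : Int) := by
    have := Int.natCast_nonneg l.length; omega
  rw [PySem.List.slice_to _ hc0, pv_fix_eq]
  have key := pv_loop_eq closing_time l 0 0
  simp only [Nat.cast_zero, Nat.sub_zero, zero_add] at key
  rw [key]
  set m := (Max.max 0 closing_time).toNat with hm
  -- the clamped prefix is the same list as the unclamped one (take clamps anyway)
  have htake : l.take ((min (Max.max closing_time 0) (l.length : Int)).toNat) = l.take m := by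
    by_cases h : m ≤ l.length
    · have : (min (Max.max closing_time 0) (l.length : Int)).toNat = m := by omega
      rw [this]
    · have h1 : (min (Max.max closing_time 0) (l.length : Int)).toNat = l.length := by omega
      rw [h1, List.take_length, List.take_of_length_le (by omega)]
  rw [htake]
  -- split the total Y count at m
  have hsplit : (l.count "Y" : Int)
      = ((l.take m).count "Y" : Int) + ((l.drop m).count "Y" : Int) := by
    conv_lhs => rw [← List.take_append_drop m l]
    rw [List.count_append]; push_cast; ring
  rw [hsplit]; ring
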